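-- pv_equiv track=rewrite | github.com/dlrtn/algorithm | programmers/Algorithm/코딩 기초 트레이닝/조건에 맞게 수열 변환하기 2.py | solution
-- ===== SOURCE A (Python) =====
-- def solution(arr):
--     answer = 0
--     flag = False
--     while True:
--
--         for i in range(len(arr)):
--             if arr[i] >= 50 and arr[i] % 2 == 0:
--                 arr[i] = arr[i] // 2
--                 flag = True
--             elif arr[i] < 50 and arr[i] % 2 == 1:
--                 arr[i] = arr[i] * 2 + 1
--                 flag = True
--
--         if flag == False:
--             break
--         else:
--             answer += 1
--
--         flag = False
--
--     return answer
-- ===== SOURCE B (Python) =====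
-- def solution(arr):
--     best = 0
--     for i in range(len(arr)):
--         x = arr[i]
--         c = 0
--         while True:
--             if x >= 50 and x % 2 == 0:
--                 x = x // 2
--             elif x < 50 and x % 2 == 1:
--                 x = x * 2 + 1
--             else:
--                 break
--             c += 1
--         arr[i] = x
--         best = max(best, c)
--     return best
-- ===== Notes on version B (the rewrite author's own statement) =====
-- stated objective: alternative
-- what changed: Replaces A's repeated whole-array rescan rounds (loop until a full pass changes nothing) by one independent stabilization loop per element, returning the maximum per-element step count, which equals the round count because elements evolve independently.
import Mathlib
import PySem

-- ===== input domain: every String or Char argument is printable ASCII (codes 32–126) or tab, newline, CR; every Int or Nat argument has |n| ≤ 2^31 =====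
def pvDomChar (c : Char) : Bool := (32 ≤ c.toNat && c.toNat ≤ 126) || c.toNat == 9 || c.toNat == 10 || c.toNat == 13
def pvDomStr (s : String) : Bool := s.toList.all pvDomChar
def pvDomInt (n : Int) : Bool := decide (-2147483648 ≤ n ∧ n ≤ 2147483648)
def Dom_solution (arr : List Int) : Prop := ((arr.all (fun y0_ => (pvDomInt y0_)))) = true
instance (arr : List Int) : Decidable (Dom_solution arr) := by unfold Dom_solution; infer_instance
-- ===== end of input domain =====

-- B replaces A's repeated full-array rescan rounds by one independent per-element
-- stabilization loop, returning the maximum per-element step count (objective: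
-- alternative/faster traversal strategy). Both Pythons mutate arr in place to the
-- same final values; the theorems here are about the return value.

-- ===== PORT A =====
-- one 'for i in range(len(arr))' pass: rebuilds the list and threads the flag
def solutionPass : List Int → Bool → List Int × Bool
  | [], flag => ([], flag)
  | x :: xs, flag =>
    if 50 ≤ x ∧ PySem.Int.mod x 2 = 0 then
      (PySem.Int.floordiv x 2 :: (solutionPass xs true).1, (solutionPass xs true).2)
    else if x < 50 ∧ PySem.Int.mod x 2 = 1 then
      ((x * 2 + 1) :: (solutionPass xs true).1, (solutionPass xs true).2)
    else
      (x :: (solutionPass xs flag).1, (solutionPass xs flag).2)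

-- the 'while True' loop; the fuel only makes the recursion total (Python has no bound)
def solutionLoop : Nat → List Int → Int → Int
  | 0, _, answer => answer
  | fuel + 1, arr, answer =>
    if (solutionPass arr false).2 = false then answer
    else solutionLoop fuel (solutionPass arr false).1 (answer + 1)

def solution (arr : List Int) : Int := solutionLoop 1000000000 arr 0

-- ===== PORT B =====
-- B's inner 'while True' on a single element; fuel only for totality
def altCount : Nat → Int → Int → Int
  | 0, _, c => c
  | fuel + 1, x, c =>
    if 50 ≤ x ∧ PySem.Int.mod x 2 = 0 then altCount fuel (PySem.Int.floordiv x 2) (c + 1)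
    else if x < 50 ∧ PySem.Int.mod x 2 = 1 then altCount fuel (x * 2 + 1) (c + 1)
    else c

def solution_alt (arr : List Int) : Int :=
  arr.foldl (fun best x => max best (altCount 1000000000 x 0)) 0

-- ===== PRECONDITION & SPEC =====
-- No Pre_: the ports agree on every input. (On arrays with a negative odd element both
-- Pythons loop forever — neither returns, so nothing is claimed or excluded there.)
def Spec_solution (arr : List Int) (out : Int) : Prop := out = solution_alt arr
instance (arr : List Int) (out : Int) : Decidable (Spec_solution arr out) := by unfold Spec_solution; infer_instance

-- ===== CLAIM (what is proved, stated in full; the proofs are below) =====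
def Claim_equal_solution : Prop := ∀ (arr : List Int), Dom_solution arr → Spec_solution arr (solution arr)

-- ===== LEMMAS AND PROOFS =====

-- the single-element transform A applies in one pass
def pvStep (x : Int) : Int :=
  if 50 ≤ x ∧ PySem.Int.mod x 2 = 0 then PySem.Int.floordiv x 2
  else if x < 50 ∧ PySem.Int.mod x 2 = 1 then x * 2 + 1
  else x

def pvUnst (x : Int) : Bool :=
  decide ((50 ≤ x ∧ PySem.Int.mod x 2 = 0) ∨ (x < 50 ∧ PySem.Int.mod x 2 = 1))

lemma pass_fst (arr : List Int) (flag : Bool) : (solutionPass arr flag).1 = arr.map pvStep := by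
  induction arr generalizing flag with
  | nil => simp [solutionPass]
  | cons x xs ih =>
    simp only [solutionPass, pvStep, List.map]
    split_ifs with h1 h2 <;> simp only [ih]

lemma pass_snd (arr : List Int) (flag : Bool) :
    (solutionPass arr flag).2 = (flag || arr.any pvUnst) := by
  induction arr generalizing flag with
  | nil => simp [solutionPass]
  | cons x xs ih =>
    simp only [solutionPass, List.any_cons]
    split_ifs with h1 h2
    · have hx : pvUnst x = true := by unfold pvUnst; exact decide_eq_true (Or.inl h1)
      rw [ih, hx]; cases flag <;> simp
    · have hx : pvUnst x = true := by unfold pvUnst; exact decide_eq_true (Or.inr h2)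
      rw [ih, hx]; cases flag <;> simp
    · have hx : pvUnst x = false := by
        unfold pvUnst; simp only [decide_eq_false_iff_not]; tauto
      rw [ih, hx]; cases flag <;> simp

lemma altCount_shift (F : Nat) (x : Int) (c : Int) :
    altCount F x c = c + altCount F x 0 := by
  induction F generalizing x c with
  | zero => simp [altCount]
  | succ F ih =>
    simp only [altCount]
    split_ifs with h1 h2
    · rw [ih _ (c+1), ih _ (0+1)]; ring
    · rw [ih _ (c+1), ih _ (0+1)]; ring
    · ring

lemma altCount_nonneg (F : Nat) (x : Int) : 0 ≤ altCount F x 0 := by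
  induction F generalizing x with
  | zero => simp [altCount]
  | succ F ih =>
    simp only [altCount]
    split_ifs with h1 h2
    · rw [altCount_shift]; have := ih (PySem.Int.floordiv x 2); omega
    · rw [altCount_shift]; have := ih (x * 2 + 1); omega
    · omega

lemma altCount_stable (F : Nat) (x : Int) (h : pvUnst x = false) : altCount F x 0 = 0 := by
  cases F with
  | zero => rfl
  | succ F =>
    simp only [pvUnst, decide_eq_false_iff_not, not_or] at h
    simp only [altCount]
    rw [if_neg h.1, if_neg h.2]

lemma altCount_unst (F : Nat) (x : Int) (h : pvUnst x = true) :
    altCount (F + 1) x 0 = 1 + altCount F (pvStep x) 0 := by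
  simp only [pvUnst, decide_eq_true_eq] at h
  simp only [altCount, pvStep]
  rcases h with h | h
  · simp only [if_pos h]
    rw [altCount_shift]; omega
  · by_cases h1 : 50 ≤ x ∧ PySem.Int.mod x 2 = 0
    · exfalso; have := h.1; have := h1.1; omega
    · simp only [if_neg h1, if_pos h]
      rw [altCount_shift]; omega

lemma pvStep_stable (x : Int) (h : pvUnst x = false) : pvStep x = x := by
  simp only [pvUnst, decide_eq_false_iff_not, not_or] at h
  simp only [pvStep]
  rw [if_neg h.1, if_neg h.2]

lemma fold_zero (l : List Int) :
    l.foldl (fun b x => max b (altCount 0 x 0)) 0 = 0 := by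
  induction l with
  | nil => rfl
  | cons y ys ih => simpa [altCount] using ih

-- fold the max over zeros only
lemma fold_all_stable (F : Nat) (l : List Int) (h : ∀ y ∈ l, pvUnst y = false) :
    l.foldl (fun b x => max b (altCount F x 0)) 0 = 0 := by
  induction l with
  | nil => rfl
  | cons y ys ih =>
    simp only [List.foldl]
    rw [altCount_stable F y (h y (by simp))]
    simpa using ih (fun z hz => h z (by simp [hz]))

-- accumulator form of "max distributes over +1"
lemma fold_shift (F : Nat) (l : List Int) (b c : Int) (hc : 0 ≤ c) (hb : b = 1 + c) :
    l.foldl (fun acc y => max acc (altCount (F + 1) y 0)) b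
      = 1 + l.foldl (fun acc y => max acc (altCount F (pvStep y) 0)) c := by
  induction l generalizing b c with
  | nil => simpa using hb
  | cons y ys ih =>
    simp only [List.foldl]
    by_cases hy : pvUnst y = true
    · rw [altCount_unst F y hy]
      have hg := altCount_nonneg F (pvStep y)
      exact ih _ _ (le_max_of_le_right hg) (by subst hb; omega)
    · have hy' : pvUnst y = false := by simpa using hy
      rw [altCount_stable (F + 1) y hy', pvStep_stable y hy', altCount_stable F y hy']
      exact ih _ _ (by omega) (by subst hb; omega)

lemma fold_succ_of_unst (F : Nat) (l : List Int) (h : l.any pvUnst = true) :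
    l.foldl (fun b x => max b (altCount (F + 1) x 0)) 0
      = 1 + l.foldl (fun b x => max b (altCount F (pvStep x) 0)) 0 := by
  induction l with
  | nil => simp at h
  | cons y ys ih =>
    simp only [List.foldl]
    by_cases hy : pvUnst y = true
    · rw [altCount_unst F y hy]
      have hg := altCount_nonneg F (pvStep y)
      have h1 : max 0 (1 + altCount F (pvStep y) 0) = 1 + max 0 (altCount F (pvStep y) 0) := by omega
      rw [h1]
      exact fold_shift F ys _ _ (le_max_left 0 _) rfl
    · have hy' : pvUnst y = false := by simpa using hy
      rw [altCount_stable (F + 1) y hy', pvStep_stable y hy', altCount_stable F y hy']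
      simp only [max_self]
      have hys : ys.any pvUnst = true := by
        simp only [List.any_cons, hy', Bool.false_or] at h; exact h
      simpa using ih hys

lemma fold_map_step (F : Nat) (l : List Int) :
    (l.map pvStep).foldl (fun b x => max b (altCount F x 0)) 0
      = l.foldl (fun b x => max b (altCount F (pvStep x) 0)) 0 := by
  rw [List.foldl_map]

lemma loop_eq (F : Nat) (arr : List Int) (a : Int) :
    solutionLoop F arr a = a + arr.foldl (fun b x => max b (altCount F x 0)) 0 := by
  induction F generalizing arr a with
  | zero =>
    simp only [solutionLoop]
    rw [fold_zero arr]; omega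
  | succ F ih =>
    simp only [solutionLoop, pass_snd]
    by_cases hany : arr.any pvUnst = true
    · rw [hany]
      simp only [Bool.false_or, Bool.true_eq_false, if_false]
      rw [pass_fst, ih, fold_map_step, fold_succ_of_unst F arr hany]
      ring
    · have hf : arr.any pvUnst = false := by simpa using hany
      have hall : ∀ y ∈ arr, pvUnst y = false := by
        intro y hy
        by_contra hne
        have : arr.any pvUnst = true := List.any_eq_true.mpr ⟨y, hy, by simpa using hne⟩
        simp [this] at hf
      rw [hf]
      simp only [Bool.false_or]
      rw [if_pos trivial, fold_all_stable (F + 1) arr hall]; omega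

-- ===== VERDICT (by name: the statement is the Claim_ definition above) =====
theorem solution_spec : Claim_equal_solution := by
  intro arr _
  unfold Spec_solution solution solution_alt
  simpa using loop_eq 1000000000 arr 0
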